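-- pv_equiv track=rewrite | github.com/seanpatrickduggan/data-mining-uml25 | homework8/ch6_ex12/contingency-tables.py | count_rule
-- ===== SOURCE A (Python) =====
-- def count_rule(X, Y, transactions):
--     both_present = x_present_y_absent = x_absent_y_present = both_absent = 0
--     for trans in transactions:
--         x_in = X.issubset(trans)
--         y_in = Y.issubset(trans)
--         if x_in and y_in:
--             both_present += 1
--         elif x_in and not y_in:
--             x_present_y_absent += 1
--         elif not x_in and y_in:
--             x_absent_y_present += 1
--         else:
--             both_absent += 1
--     return both_present, x_present_y_absent, x_absent_y_present, both_absent
-- ===== SOURCE B (Python) =====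
-- def count_rule(X, Y, transactions):
--     ts = list(transactions)
--     xs = [t for t in ts if X.issubset(t)]
--     cx = len(xs)
--     cxy = sum(1 for t in xs if Y.issubset(t))
--     cy = sum(1 for t in ts if Y.issubset(t))
--     n = len(ts)
--     return cxy, cx - cxy, cy - cxy, n - cx - cy + cxy
-- ===== Notes on version B (the rewrite author's own statement) =====
-- stated objective: alternative
-- what changed: B replaces A's single classifying loop with staged passes: it filters the X-supporting transactions into a sublist, counts Y-support inside that sublist and in the whole list, and derives the four exclusive cells by inclusion-exclusion; the X subset test runs once per transaction and the joint test only over the filtered sublist.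
import Mathlib
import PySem

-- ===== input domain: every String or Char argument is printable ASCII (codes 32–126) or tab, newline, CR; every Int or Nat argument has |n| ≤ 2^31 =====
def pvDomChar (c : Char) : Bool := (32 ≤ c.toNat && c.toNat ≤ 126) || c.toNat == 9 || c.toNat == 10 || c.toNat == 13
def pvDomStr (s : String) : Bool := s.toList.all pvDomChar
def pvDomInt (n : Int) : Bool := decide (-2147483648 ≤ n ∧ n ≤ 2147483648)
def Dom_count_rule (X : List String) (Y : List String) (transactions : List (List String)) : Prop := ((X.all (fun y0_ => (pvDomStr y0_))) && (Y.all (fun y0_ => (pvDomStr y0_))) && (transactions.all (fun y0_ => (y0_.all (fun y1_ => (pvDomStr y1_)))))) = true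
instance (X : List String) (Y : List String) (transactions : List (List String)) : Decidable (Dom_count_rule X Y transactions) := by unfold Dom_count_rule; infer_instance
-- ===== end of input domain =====

-- B (alternative decomposition, same cost): staged passes — filter the X-supporting
-- transactions, count Y-support in that sublist and in the whole list, and derive the
-- four exclusive cells by inclusion-exclusion, instead of A's single classifying loop.

-- ===== PORT A =====
-- X.issubset(trans): every element of X is a member of trans (exact for string sets/lists)
def pySubset (X trans : List String) : Bool := X.all (fun e => trans.contains e)

-- one iteration of A's loop body: the elif chain over the four exclusive buckets
def stepA (X Y : List String) (s : Int × Int × Int × Int) (trans : List String) :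
    Int × Int × Int × Int :=
  let x_in := pySubset X trans
  let y_in := pySubset Y trans
  if x_in && y_in then (s.1 + 1, s.2.1, s.2.2.1, s.2.2.2)
  else if x_in && !y_in then (s.1, s.2.1 + 1, s.2.2.1, s.2.2.2)
  else if !x_in && y_in then (s.1, s.2.1, s.2.2.1 + 1, s.2.2.2)
  else (s.1, s.2.1, s.2.2.1, s.2.2.2 + 1)

def count_rule (X : List String) (Y : List String) (transactions : List (List String)) :
    Int × Int × Int × Int :=
  transactions.foldl (stepA X Y) (0, 0, 0, 0)

-- ===== PORT B =====
def count_rule_alt (X : List String) (Y : List String) (transactions : List (List String)) :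
    Int × Int × Int × Int :=
  let xs := transactions.filter (fun t => pySubset X t)
  let cx : Int := xs.length
  let cxy : Int := xs.countP (fun t => pySubset Y t)
  let cy : Int := transactions.countP (fun t => pySubset Y t)
  let n : Int := transactions.length
  (cxy, cx - cxy, cy - cxy, n - cx - cy + cxy)

-- ===== PRECONDITION & SPEC =====
def Spec_count_rule (X : List String) (Y : List String) (transactions : List (List String)) (out : Int × Int × Int × Int) : Prop := out = count_rule_alt X Y transactions
instance (X : List String) (Y : List String) (transactions : List (List String)) (out : Int × Int × Int × Int) : Decidable (Spec_count_rule X Y transactions out) := by unfold Spec_count_rule; infer_instance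

-- ===== CLAIM (what is proved, stated in full; the proofs are below) =====
def Claim_equal_count_rule : Prop := ∀ (X : List String) (Y : List String) (transactions : List (List String)), Dom_count_rule X Y transactions → Spec_count_rule X Y transactions (count_rule X Y transactions)

-- ===== LEMMAS AND PROOFS =====

theorem count_rule_loop (X Y : List String) (ts : List (List String))
    (bp xa ay ba : Int) :
    ts.foldl (stepA X Y) (bp, xa, ay, ba) =
      (bp + ((ts.filter (fun t => pySubset X t)).countP (fun t => pySubset Y t) : Int),
       xa + ((ts.filter (fun t => pySubset X t)).length : Int)
          - ((ts.filter (fun t => pySubset X t)).countP (fun t => pySubset Y t) : Int),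
       ay + (ts.countP (fun t => pySubset Y t) : Int)
          - ((ts.filter (fun t => pySubset X t)).countP (fun t => pySubset Y t) : Int),
       ba + (ts.length : Int) - ((ts.filter (fun t => pySubset X t)).length : Int)
          - (ts.countP (fun t => pySubset Y t) : Int)
          + ((ts.filter (fun t => pySubset X t)).countP (fun t => pySubset Y t) : Int)) := by
  induction ts generalizing bp xa ay ba with
  | nil => simp
  | cons t rest ih =>
    simp only [List.foldl_cons, stepA, List.filter_cons, List.countP_cons, List.length_cons]
    cases hx : pySubset X t <;> cases hy : pySubset Y t <;>
      simp [hy, ih] <;> omega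

-- ===== VERDICT =====
theorem count_rule_spec : Claim_equal_count_rule := by
  intro X Y ts _
  unfold Spec_count_rule count_rule count_rule_alt
  rw [count_rule_loop]
  simp
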